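-- pv_equiv track=rewrite | github.com/Smithyanka/SmithanaTool | smithanatool_qt/tabs/parsers/kakao/shared/episodes/specs.py | parse_chapter_spec
-- ===== SOURCE A (Python) =====
-- def parse_chapter_spec(spec: str) -> list[int]:
--     out, seen = [], set()
--     for chunk in (spec or '').replace(',', ' ').split():
--         if '-' in chunk:
--             a, b = chunk.split('-', 1)
--             if a.isdigit() and b.isdigit():
--                 lo, hi = int(a), int(b)
--                 if lo <= hi:
--                     for x in range(lo, hi + 1):
--                         if x not in seen:
--                             out.append(x)
--                             seen.add(x)
--         elif chunk.isdigit():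
--             x = int(chunk)
--             if x not in seen:
--                 out.append(x)
--                 seen.add(x)
--     return out
-- ===== SOURCE B (Python) =====
-- def _cut(seg, a, b):
--     # parts of segment seg outside the covered interval [a, b], in order
--     l, h = seg
--     if b < l or h < a:
--         return [seg]
--     parts = []
--     if l < a:
--         parts.append((l, a - 1))
--     if b < h:
--         parts.append((b + 1, h))
--     return parts
--
--
-- def _interval(chunk):
--     # chunk -> inclusive interval, or None if the chunk is rejected
--     if '-' in chunk:
--         a, b = chunk.split('-', 1)
--         if a.isdigit() and b.isdigit():
--             lo, hi = int(a), int(b)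
--             if lo <= hi:
--                 return (lo, hi)
--     elif chunk.isdigit():
--         x = int(chunk)
--         return (x, x)
--     return None
--
--
-- def parse_chapter_spec(spec: str) -> list[int]:
--     # interval-subtraction algorithm: no per-element seen-set; each new interval is
--     # cut against all previously accepted intervals and only the uncovered gaps are emitted
--     out, ivs = [], []
--     for chunk in (spec or '').replace(',', ' ').split():
--         iv = _interval(chunk)
--         if iv is None:
--             continue
--         segs = [iv]
--         for cov in ivs:
--             segs = [p for s in segs for p in _cut(s, cov[0], cov[1])]
--         for l, h in segs:
--             out.extend(range(l, h + 1))
--         ivs.append(iv)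
--     return out
-- ===== Notes on version B (the rewrite author's own statement) =====
-- stated objective: alternative
-- what changed: B replaces A's element-level seen-set with an interval-subtraction algorithm: each accepted chunk becomes an inclusive interval that is cut against the list of previously accepted intervals, and only the uncovered gap sub-intervals are expanded and emitted, so no per-number membership test or set exists at all.
import Mathlib
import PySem

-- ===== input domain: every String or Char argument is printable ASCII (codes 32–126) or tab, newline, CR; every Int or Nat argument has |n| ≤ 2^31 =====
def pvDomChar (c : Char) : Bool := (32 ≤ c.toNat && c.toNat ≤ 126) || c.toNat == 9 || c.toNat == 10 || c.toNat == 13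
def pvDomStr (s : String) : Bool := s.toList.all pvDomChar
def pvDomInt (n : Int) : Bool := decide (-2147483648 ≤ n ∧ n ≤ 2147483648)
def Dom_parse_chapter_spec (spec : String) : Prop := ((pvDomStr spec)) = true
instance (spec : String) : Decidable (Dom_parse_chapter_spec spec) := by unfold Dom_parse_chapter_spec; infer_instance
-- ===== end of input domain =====

-- B replaces A's per-number seen-set with an interval-subtraction algorithm (cut each new
-- interval against the previously accepted ones, emit only the uncovered gaps); alternative, same observable result.

-- ===== PORT A =====
-- one chunk of A's loop body; state = (out, seen). The `| _ => st` arm of the match is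
-- unreachable: '-' ∈ chunk guarantees split('-', 1) yields two pieces (Python's unpack succeeds).
def pvStepA (st : List Int × PySem.Set Int) (chunk : List Char) : List Int × PySem.Set Int :=
  if chunk.contains '-' then
    match PySem.Chars.splitOnMax chunk ['-'] 1 with
    | a :: b :: _ =>
      if PySem.Chars.strIsdigit a && PySem.Chars.strIsdigit b then
        -- int(a), int(b): a, b are all-digit so int() cannot raise; getD 0 is never taken
        let lo := (PySem.Int.ofChars? a).getD 0
        let hi := (PySem.Int.ofChars? b).getD 0
        if lo ≤ hi then
          (PySem.List.pyRange lo (hi + 1) 1).foldl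
            (fun st x =>
              if PySem.Set.contains st.2 x then st
              else (st.1 ++ [x], PySem.Set.add st.2 x)) st
        else st
      else st
    | _ => st
  else if PySem.Chars.strIsdigit chunk then
    let x := (PySem.Int.ofChars? chunk).getD 0
    if PySem.Set.contains st.2 x then st
    else (st.1 ++ [x], PySem.Set.add st.2 x)
  else st

def parse_chapter_spec (spec : String) : List Int :=
  -- (spec or '') is spec itself for every string input ('' or '' == '')
  ((PySem.Chars.split₀ (PySem.Chars.replace spec.toList [','] [' '])).foldl
      pvStepA ([], PySem.Set.empty)).1

-- ===== PORT B =====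
-- _cut from Source B: the parts of segment seg outside the covered interval [a, b]
def pvCut (seg : Int × Int) (a b : Int) : List (Int × Int) :=
  if b < seg.1 ∨ seg.2 < a then [seg]
  else (if seg.1 < a then [(seg.1, a - 1)] else []) ++
       (if b < seg.2 then [(b + 1, seg.2)] else [])

-- _interval from Source B: chunk -> inclusive interval, none if the chunk is rejected
def pvInterval (chunk : List Char) : Option (Int × Int) :=
  if chunk.contains '-' then
    match PySem.Chars.splitOnMax chunk ['-'] 1 with
    | a :: b :: _ =>
      if PySem.Chars.strIsdigit a && PySem.Chars.strIsdigit b then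
        let lo := (PySem.Int.ofChars? a).getD 0
        let hi := (PySem.Int.ofChars? b).getD 0
        if lo ≤ hi then some (lo, hi) else none
      else none
    | _ => none
  else if PySem.Chars.strIsdigit chunk then
    some ((PySem.Int.ofChars? chunk).getD 0, (PySem.Int.ofChars? chunk).getD 0)
  else none

-- one chunk of B's loop body; state = (out, ivs)
def pvStepB (st : List Int × List (Int × Int)) (chunk : List Char) : List Int × List (Int × Int) :=
  match pvInterval chunk with
  | none => st
  | some iv =>
    let segs := st.2.foldl (fun segs cov => segs.flatMap (fun s => pvCut s cov.1 cov.2)) [iv]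
    (st.1 ++ segs.flatMap (fun s => PySem.List.pyRange s.1 (s.2 + 1) 1), st.2 ++ [iv])

def parse_chapter_spec_alt (spec : String) : List Int :=
  ((PySem.Chars.split₀ (PySem.Chars.replace spec.toList [','] [' '])).foldl
      pvStepB ([], [])).1

-- ===== PRECONDITION & SPEC =====
def Spec_parse_chapter_spec (spec : String) (out : List Int) : Prop := out = parse_chapter_spec_alt spec
instance (spec : String) (out : List Int) : Decidable (Spec_parse_chapter_spec spec out) := by unfold Spec_parse_chapter_spec; infer_instance

-- ===== CLAIM (what is proved, stated in full; the proofs are below) =====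
def Claim_equal_parse_chapter_spec : Prop := ∀ (spec : String), Dom_parse_chapter_spec spec → Spec_parse_chapter_spec spec (parse_chapter_spec spec)

-- ===== LEMMAS AND PROOFS =====

-- x is covered by some interval of ivs
def pvCov (ivs : List (Int × Int)) (x : Int) : Bool :=
  ivs.any (fun p => decide (p.1 ≤ x) && decide (x ≤ p.2))

-- flatten a segment list into the numbers it denotes
def pvFlat (segs : List (Int × Int)) : List Int :=
  segs.flatMap (fun s => PySem.List.pyRange s.1 (s.2 + 1) 1)

theorem pvCut_flat (l h a b : Int) (hab : a ≤ b) :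
    pvFlat (pvCut (l, h) a b)
      = (PySem.List.pyRange l (h + 1) 1).filter
          (fun x => !(decide (a ≤ x) && decide (x ≤ b))) := by
  unfold pvCut pvFlat
  by_cases hout : b < l ∨ h < a
  · simp only [hout, if_true, List.flatMap_cons, List.flatMap_nil, List.append_nil]
    refine (List.filter_eq_self.mpr ?_).symm
    intro x hx
    rw [PySem.List.mem_pyRange_one] at hx
    rcases hout with h1 | h1 <;> simp <;> omega
  · push Not at hout
    obtain ⟨hlb, hah⟩ := hout
    have hsplit1 : l ≤ a ⊔ l := le_max_right _ _
    simp only [if_neg (by omega : ¬ (b < l ∨ h < a))]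
    by_cases h1 : l < a <;> by_cases h2 : b < h
    · -- two pieces
      simp only [h1, h2, if_true, List.cons_append, List.nil_append,
        List.flatMap_cons, List.flatMap_nil, List.append_nil]
      rw [PySem.List.pyRange_one_append l a (h + 1) (by omega) (by omega),
          PySem.List.pyRange_one_append a (b + 1) (h + 1) (by omega) (by omega),
          List.filter_append, List.filter_append]
      have e1 : (PySem.List.pyRange l a 1).filter
          (fun x => !(decide (a ≤ x) && decide (x ≤ b)))
          = PySem.List.pyRange l a 1 := by
        refine List.filter_eq_self.mpr ?_
        intro x hx; rw [PySem.List.mem_pyRange_one] at hx; simp; omega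
      have e2 : (PySem.List.pyRange a (b + 1) 1).filter
          (fun x => !(decide (a ≤ x) && decide (x ≤ b))) = [] := by
        refine List.filter_eq_nil_iff.mpr ?_
        intro x hx; rw [PySem.List.mem_pyRange_one] at hx; simp; omega
      have e3 : (PySem.List.pyRange (b + 1) (h + 1) 1).filter
          (fun x => !(decide (a ≤ x) && decide (x ≤ b)))
          = PySem.List.pyRange (b + 1) (h + 1) 1 := by
        refine List.filter_eq_self.mpr ?_
        intro x hx; rw [PySem.List.mem_pyRange_one] at hx; simp; omega
      rw [e1, e2, e3]
      have : a - 1 + 1 = a := by omega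
      simp [this]
    · -- left piece only
      simp only [h1, h2, if_true, if_false, List.append_nil,
        List.flatMap_cons, List.flatMap_nil]
      rw [PySem.List.pyRange_one_append l a (h + 1) (by omega) (by omega),
          List.filter_append]
      have e1 : (PySem.List.pyRange l a 1).filter
          (fun x => !(decide (a ≤ x) && decide (x ≤ b)))
          = PySem.List.pyRange l a 1 := by
        refine List.filter_eq_self.mpr ?_
        intro x hx; rw [PySem.List.mem_pyRange_one] at hx; simp; omega
      have e2 : (PySem.List.pyRange a (h + 1) 1).filter
          (fun x => !(decide (a ≤ x) && decide (x ≤ b))) = [] := by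
        refine List.filter_eq_nil_iff.mpr ?_
        intro x hx; rw [PySem.List.mem_pyRange_one] at hx; simp; omega
      rw [e1, e2]
      have : a - 1 + 1 = a := by omega
      simp [this]
    · -- right piece only
      simp only [h1, h2, if_false, if_true, List.nil_append,
        List.flatMap_cons, List.flatMap_nil, List.append_nil]
      rw [PySem.List.pyRange_one_append l (b + 1) (h + 1) (by omega) (by omega),
          List.filter_append]
      have e1 : (PySem.List.pyRange l (b + 1) 1).filter
          (fun x => !(decide (a ≤ x) && decide (x ≤ b))) = [] := by
        refine List.filter_eq_nil_iff.mpr ?_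
        intro x hx; rw [PySem.List.mem_pyRange_one] at hx; simp; omega
      have e2 : (PySem.List.pyRange (b + 1) (h + 1) 1).filter
          (fun x => !(decide (a ≤ x) && decide (x ≤ b)))
          = PySem.List.pyRange (b + 1) (h + 1) 1 := by
        refine List.filter_eq_self.mpr ?_
        intro x hx; rw [PySem.List.mem_pyRange_one] at hx; simp; omega
      rw [e1, e2]
      simp
    · -- fully covered
      simp only [h1, h2, if_false, List.append_nil, List.flatMap_nil]
      refine (List.filter_eq_nil_iff.mpr ?_).symm
      intro x hx; rw [PySem.List.mem_pyRange_one] at hx; simp; omega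

-- cutting a segment list by all of ivs = filtering out the numbers ivs covers
theorem pvSubtract_flat (ivs : List (Int × Int)) (segs : List (Int × Int))
    (hok : ∀ p ∈ ivs, p.1 ≤ p.2) :
    pvFlat (ivs.foldl (fun segs cov => segs.flatMap (fun s => pvCut s cov.1 cov.2)) segs)
      = (pvFlat segs).filter (fun x => !pvCov ivs x) := by
  induction ivs generalizing segs with
  | nil => simp [pvCov]
  | cons p ivs ih =>
      obtain ⟨a, b⟩ := p
      have hab : a ≤ b := hok (a, b) (by simp)
      rw [List.foldl_cons,
          ih _ (fun q hq => hok q (by simp [hq]))]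
      have hflat : pvFlat (segs.flatMap (fun s => pvCut s a b))
          = (pvFlat segs).filter (fun x => !(decide (a ≤ x) && decide (x ≤ b))) := by
        unfold pvFlat
        rw [List.flatMap_assoc, List.filter_flatMap]
        refine List.flatMap_congr ?_ 
        intro s _
        obtain ⟨l, h⟩ := s
        exact pvCut_flat l h a b hab
      rw [hflat, List.filter_filter]
      refine List.filter_congr ?_
      intro x _
      simp [pvCov, Bool.not_or, Bool.and_comm]

-- A's inner dedup-append loop over a Nodup list, from any state
theorem pvInnerA (L : List Int) (hnd : L.Nodup) (out : List Int) (s : PySem.Set Int) :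
    L.foldl
      (fun st x =>
        if PySem.Set.contains st.2 x then st
        else (st.1 ++ [x], PySem.Set.add st.2 x)) (out, s)
      = (out ++ L.filter (fun x => !PySem.Set.contains s x), L.foldl PySem.Set.add s) := by
  induction L generalizing out s with
  | nil => simp
  | cons a L ih =>
      have hnd' : L.Nodup := hnd.of_cons
      have hna : a ∉ L := (List.nodup_cons.mp hnd).1
      by_cases hc : PySem.Set.contains s a
      · have hmem : a ∈ s := by simpa using hc
        have hadd : PySem.Set.add s a = s := by
          simp [PySem.Set.add, hmem]
        simp only [List.foldl_cons]
        rw [if_pos hc, ih hnd' out s, List.filter_cons]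
        simp [hmem]
      · simp only [List.foldl_cons]
        rw [if_neg hc, ih hnd' (out ++ [a]) (PySem.Set.add s a)]
        have hfil : L.filter (fun x => !PySem.Set.contains (PySem.Set.add s a) x)
            = L.filter (fun x => !PySem.Set.contains s x) := by
          refine List.filter_congr ?_
          intro x hx
          have hxa : x ≠ a := fun h => hna (h ▸ hx)
          have : x ∈ PySem.Set.add s a ↔ x ∈ s := by
            rw [PySem.Set.mem_add]; simp [hxa]
          simp only [PySem.Set.contains_eq_listContains] at *
          simp only [List.contains_iff_mem] at *
          simp [this]
        rw [hfil]
        have hmem : a ∉ s := by simpa using hc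
        simp [hmem]

-- one A-step, characterized through pvInterval
theorem pvStepA_char (out : List Int) (s : PySem.Set Int) (c : List Char) :
    pvStepA (out, s) c
      = match pvInterval c with
        | none => (out, s)
        | some iv =>
          (out ++ (PySem.List.pyRange iv.1 (iv.2 + 1) 1).filter
              (fun x => !PySem.Set.contains s x),
           (PySem.List.pyRange iv.1 (iv.2 + 1) 1).foldl PySem.Set.add s) := by
  unfold pvStepA pvInterval
  by_cases hdash : c.contains '-'
  · simp only [hdash, if_true]
    cases hsplit : PySem.Chars.splitOnMax c ['-'] 1 with
    | nil => rfl
    | cons a rest =>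
        cases rest with
        | nil => rfl
        | cons b rest' =>
            by_cases hd : PySem.Chars.strIsdigit a && PySem.Chars.strIsdigit b
            · simp only [hd, if_true]
              by_cases hle : (PySem.Int.ofChars? a).getD 0 ≤ (PySem.Int.ofChars? b).getD 0
              · simp only [hle, if_true]
                exact pvInnerA _ (PySem.List.nodup_pyRange_one _ _) out s
              · simp [hle]
            · simp [hd]
  · simp only [hdash, if_false, Bool.false_eq_true]
    by_cases hd : PySem.Chars.strIsdigit c
    · simp only [hd, if_true]
      rw [PySem.List.pyRange_one_singleton]
      by_cases hc : PySem.Set.contains s ((PySem.Int.ofChars? c).getD 0)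
      · have hmem : (PySem.Int.ofChars? c).getD 0 ∈ s := by simpa using hc
        simp [hmem, PySem.Set.add]
      · have hmem : (PySem.Int.ofChars? c).getD 0 ∉ s := by simpa using hc
        simp [hmem]
    · simp [hd]

-- every interval pvInterval accepts is nonempty
theorem pvInterval_ok (c : List Char) (iv : Int × Int) (h : pvInterval c = some iv) :
    iv.1 ≤ iv.2 := by
  unfold pvInterval at h
  by_cases hdash : c.contains '-'
  · simp only [hdash, if_true] at h
    cases hsplit : PySem.Chars.splitOnMax c ['-'] 1 with
    | nil => rw [hsplit] at h; exact absurd h (by simp)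
    | cons a rest =>
        cases rest with
        | nil => rw [hsplit] at h; exact absurd h (by simp)
        | cons b rest' =>
            rw [hsplit] at h
            by_cases hd : PySem.Chars.strIsdigit a && PySem.Chars.strIsdigit b
            · simp only [hd, if_true] at h
              by_cases hle : (PySem.Int.ofChars? a).getD 0 ≤ (PySem.Int.ofChars? b).getD 0
              · simp only [hle, if_true, Option.some.injEq] at h
                rw [← h]; exact hle
              · simp [hle] at h
            · simp [hd] at h
  · simp only [hdash, if_false, Bool.false_eq_true] at h
    by_cases hd : PySem.Chars.strIsdigit c
    · simp only [hd, if_true, Option.some.injEq] at h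
      rw [← h]
    · simp [hd] at h

-- the main loop invariant: same out so far, seen-set and interval list cover the same numbers
theorem pvMain (chunks : List (List Char)) (out : List Int)
    (s : PySem.Set Int) (ivs : List (Int × Int))
    (hcov : ∀ x : Int, PySem.Set.contains s x = pvCov ivs x)
    (hok : ∀ p ∈ ivs, p.1 ≤ p.2) :
    (chunks.foldl pvStepA (out, s)).1 = (chunks.foldl pvStepB (out, ivs)).1 := by
  induction chunks generalizing out s ivs with
  | nil => rfl
  | cons c cs ih =>
      simp only [List.foldl_cons]
      rw [pvStepA_char]
      cases hiv : pvInterval c with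
      | none =>
          simp only [pvStepB, hiv]
          exact ih out s ivs hcov hok
      | some iv =>
          obtain ⟨lo, hi⟩ := iv
          have hle : lo ≤ hi := pvInterval_ok c (lo, hi) hiv
          simp only [pvStepB, hiv]
          have hsub := pvSubtract_flat ivs [(lo, hi)] hok
          have hflat1 : pvFlat [(lo, hi)] = PySem.List.pyRange lo (hi + 1) 1 := by
            simp [pvFlat]
          rw [hflat1] at hsub
          have hfil : (PySem.List.pyRange lo (hi + 1) 1).filter
              (fun x => !PySem.Set.contains s x)
              = (PySem.List.pyRange lo (hi + 1) 1).filter (fun x => !pvCov ivs x) := by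
            refine List.filter_congr ?_
            intro x _; rw [hcov x]
          have hemit :
              (PySem.List.pyRange lo (hi + 1) 1).filter (fun x => !PySem.Set.contains s x)
              = (ivs.foldl (fun segs cov => segs.flatMap (fun s => pvCut s cov.1 cov.2))
                  [(lo, hi)]).flatMap (fun s => PySem.List.pyRange s.1 (s.2 + 1) 1) := by
            rw [hfil, ← hsub]; rfl
          rw [hemit]
          refine ih _ _ _ ?_ ?_
          · intro x
            have hmem : x ∈ (PySem.List.pyRange lo (hi + 1) 1).foldl PySem.Set.add s
                ↔ x ∈ s ∨ x ∈ PySem.List.pyRange lo (hi + 1) 1 := by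
              simpa using
                (PySem.Set.mem_foldl_add (f := fun b : Int => b)
                  (l := PySem.List.pyRange lo (hi + 1) 1) (s := s) (y := x))
            have hcv : pvCov (ivs ++ [(lo, hi)]) x
                = (pvCov ivs x || (decide (lo ≤ x) && decide (x ≤ hi))) := by
              simp [pvCov]
            rw [hcv, ← hcov x, Bool.eq_iff_iff]
            simp only [PySem.Set.contains_eq_listContains, List.contains_iff_mem,
              Bool.or_eq_true, Bool.and_eq_true, decide_eq_true_eq]
            rw [hmem, PySem.List.mem_pyRange_one]
            constructor
            · rintro (h | h)
              · left; exact h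
              · right; omega
            · rintro (h | h)
              · left; exact h
              · right; omega
          · intro p hp
            rcases List.mem_append.mp hp with h | h
            · exact hok p h
            · simp only [List.mem_singleton] at h
              subst h; simpa using hle

-- ===== VERDICT (by name: the statement is the Claim_ definition above) =====
theorem parse_chapter_spec_spec : Claim_equal_parse_chapter_spec := by
  intro spec _
  show parse_chapter_spec spec = parse_chapter_spec_alt spec
  unfold parse_chapter_spec parse_chapter_spec_alt
  refine pvMain _ [] PySem.Set.empty [] ?_ ?_
  · intro x; simp [PySem.Set.empty, pvCov]
  · intro p hp; simp at hp
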